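-- pv_equiv track=rewrite | github.com/Adefioye/DSA-Grind75 | EPI/HASHING/12.5-nearestRepeatedEntries.py | nearestRepeatedEntries
-- ===== SOURCE A (Python) =====
-- def nearestRepeatedEntries(arr):
--     wordToLatestIndex, minEntriesDistance = {}, float("inf")
--
--     for i, word in enumerate(arr):
--
--         if word in wordToLatestIndex:
--             lastestIndex = wordToLatestIndex[word]
--             minEntriesDistance = min(minEntriesDistance, i - lastestIndex)
--
--         wordToLatestIndex[word] = i
--
--     return minEntriesDistance if minEntriesDistance != float("inf") else -1
-- ===== SOURCE B (Python) =====
-- def nearestRepeatedEntries(arr):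
--     positions = {}
--     for i, word in enumerate(arr):
--         positions.setdefault(word, []).append(i)
--     best = None
--     for idxs in positions.values():
--         for a, b in zip(idxs, idxs[1:]):
--             d = b - a
--             if best is None or d < best:
--                 best = d
--     return best if best is not None else -1
-- ===== Notes on version B (the rewrite author's own statement) =====
-- stated objective: alternative
-- what changed: Instead of a single scan keeping only each word's last-seen index and folding a running minimum inline, B builds a dict mapping each word to the full list of its indices in one pass and then, in a separate group-wise pass, takes the minimum difference of consecutive indices per group.
import Mathlib
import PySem

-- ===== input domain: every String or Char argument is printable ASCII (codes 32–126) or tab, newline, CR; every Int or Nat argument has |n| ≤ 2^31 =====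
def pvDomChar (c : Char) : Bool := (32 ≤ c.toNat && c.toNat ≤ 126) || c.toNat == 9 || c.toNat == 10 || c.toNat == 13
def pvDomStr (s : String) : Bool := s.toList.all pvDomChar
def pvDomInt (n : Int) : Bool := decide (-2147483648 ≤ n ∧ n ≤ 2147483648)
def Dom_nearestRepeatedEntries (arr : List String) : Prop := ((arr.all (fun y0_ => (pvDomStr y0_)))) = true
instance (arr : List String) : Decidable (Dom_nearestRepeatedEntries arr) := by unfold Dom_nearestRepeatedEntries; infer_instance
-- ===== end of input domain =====

-- B replaces A's single last-seen-index scan by a grouping pass (word → all its indices)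
-- followed by a group-wise minimum over consecutive index differences (objective: alternative).

-- ===== PORT A =====
-- loop body of A's single scan: state = (wordToLatestIndex, minEntriesDistance); None models float('inf')
def pvStepA (st : PySem.Dict String Int × Option Int) (p : Int × String) :
    PySem.Dict String Int × Option Int :=
  let m' := if st.1.contains p.2 then
      let lastestIndex := st.1.getD p.2 0
      some (match st.2 with
            | none => p.1 - lastestIndex
            | some m => min m (p.1 - lastestIndex))
    else st.2
  (st.1.insert p.2 p.1, m')

def nearestRepeatedEntries (arr : List String) : Int :=
  let st := (PySem.List.enumerate arr).foldl pvStepA (PySem.Dict.empty, none)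
  match st.2 with
  | none => -1
  | some m => m

-- ===== PORT B =====
-- positions.setdefault(word, []).append(i)
def pvGroupStep (d : PySem.Dict String (List Int)) (p : Int × String) : PySem.Dict String (List Int) :=
  d.modify p.2 [] (fun l => l ++ [p.1])

-- 'if best is None or d < best: best = d' for one pair (a, b)
def pvBestStep (best : Option Int) (ab : Int × Int) : Option Int :=
  let dd := ab.2 - ab.1
  match best with
  | none => some dd
  | some b => if dd < b then some dd else some b

def nearestRepeatedEntries_alt (arr : List String) : Int :=
  let positions := (PySem.List.enumerate arr).foldl pvGroupStep PySem.Dict.empty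
  let best := positions.values.foldl
    (fun best idxs => (idxs.zip (idxs.drop 1)).foldl pvBestStep best) none
  match best with
  | none => -1
  | some b => b

-- ===== PRECONDITION & SPEC =====
def Spec_nearestRepeatedEntries (arr : List String) (out : Int) : Prop := out = nearestRepeatedEntries_alt arr
instance (arr : List String) (out : Int) : Decidable (Spec_nearestRepeatedEntries arr out) := by unfold Spec_nearestRepeatedEntries; infer_instance

-- ===== CLAIM (what is proved, stated in full; the proofs are below) =====
def Claim_equal_nearestRepeatedEntries : Prop := ∀ (arr : List String), Dom_nearestRepeatedEntries arr → Spec_nearestRepeatedEntries arr (nearestRepeatedEntries arr)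

-- ===== LEMMAS AND PROOFS =====

-- A's min(m, x) with None = infinity
def pvMinStepA (m : Option Int) (x : Int) : Option Int :=
  some (match m with | none => x | some mv => min mv x)

-- consecutive differences of an index list
def pvDiffs (xs : List Int) : List Int :=
  (xs.zip (xs.drop 1)).map (fun ab => ab.2 - ab.1)

-- indices at which w occurs in an enumerated list
def pvOcc (l : List (Int × String)) (w : String) : List Int :=
  (l.filter (fun p => p.2 == w)).map (·.1)

-- the last-seen index A's dict stores for w, as a 0/1-element list
def pvPrior (d : PySem.Dict String Int) (w : String) : List Int :=
  if d.contains w then [d.getD w 0] else []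

-- the differences A's scan produces, in encounter order
def pvDlist : List (Int × String) → PySem.Dict String Int → List Int
  | [], _ => []
  | p :: t, d => (if d.contains p.2 then [p.1 - d.getD p.2 0] else []) ++ pvDlist t (d.insert p.2 p.1)

theorem pvFoldA_snd (l : List (Int × String)) (d : PySem.Dict String Int) (m : Option Int) :
    (l.foldl pvStepA (d, m)).2 = (pvDlist l d).foldl pvMinStepA m := by
  induction l generalizing d m with
  | nil => rfl
  | cons p t ih =>
      simp only [List.foldl_cons, pvDlist, List.foldl_append, pvStepA]
      by_cases h : d.contains p.2 = true <;> simp [h, ih, pvMinStepA]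

theorem pvBestStep_eq (m : Option Int) (ab : Int × Int) :
    pvBestStep m ab = pvMinStepA m (ab.2 - ab.1) := by
  cases m with
  | none => rfl
  | some b =>
      simp only [pvBestStep, pvMinStepA, Int.min_def]
      split_ifs <;> simp <;> omega

theorem pvBestStep_funext : pvBestStep = fun m ab => pvMinStepA m (ab.2 - ab.1) := by
  funext m ab
  exact pvBestStep_eq m ab

theorem pvInner_eq (xs : List Int) (m : Option Int) :
    (xs.zip (xs.drop 1)).foldl pvBestStep m = (pvDiffs xs).foldl pvMinStepA m := by
  simp only [pvDiffs, List.foldl_map]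
  rw [pvBestStep_funext]

theorem pvOuter_eq (L : List (List Int)) (m : Option Int) :
    L.foldl (fun best idxs => (idxs.zip (idxs.drop 1)).foldl pvBestStep best) m
      = ((L.map pvDiffs).flatten).foldl pvMinStepA m := by
  induction L generalizing m with
  | nil => rfl
  | cons xs L ih =>
      simp only [List.foldl_cons, List.map_cons, List.flatten_cons, List.foldl_append]
      rw [ih, pvInner_eq]

theorem pvFoldMin_some (ds : List Int) (a : Int) :
    ds.foldl pvMinStepA (some a) = some (ds.foldl min a) := by
  induction ds generalizing a with
  | nil => rfl
  | cons x t ih => simp [pvMinStepA, ih]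

theorem pvFoldMin_none (ds : List Int) : ds.foldl pvMinStepA none = ds.min? := by
  cases ds with
  | nil => rfl
  | cons a t => simp [List.min?, pvMinStepA, pvFoldMin_some]

theorem pvMin?_congr (l₁ l₂ : List Int) (h : ∀ x, x ∈ l₁ ↔ x ∈ l₂) : l₁.min? = l₂.min? := by
  rcases h₁ : l₁.min? with _ | a
  · rw [List.min?_eq_none_iff] at h₁
    subst h₁
    symm
    rw [List.min?_eq_none_iff, List.eq_nil_iff_forall_not_mem]
    intro x hx
    exact (List.not_mem_nil ((h x).2 hx))
  · rw [List.min?_eq_some_iff] at h₁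
    symm
    rw [List.min?_eq_some_iff]
    exact ⟨(h a).1 h₁.1, fun b hb => h₁.2 b ((h b).2 hb)⟩

theorem pvDiffs_cons_cons (a b : Int) (t : List Int) :
    pvDiffs (a :: b :: t) = (b - a) :: pvDiffs (b :: t) := by
  simp [pvDiffs]

-- the KEY invariant: membership in A's encounter-order diff list equals membership
-- in some per-word consecutive-diff list (with A's stored last index prepended)
theorem pvDlist_mem (l : List (Int × String)) (d : PySem.Dict String Int) (x : Int) :
    x ∈ pvDlist l d ↔ ∃ w, x ∈ pvDiffs (pvPrior d w ++ pvOcc l w) := by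
  induction l generalizing d with
  | nil =>
      simp only [pvDlist, List.not_mem_nil, false_iff, not_exists]
      intro w
      simp only [pvOcc, List.filter_nil, List.map_nil, List.append_nil, pvPrior]
      split <;> simp [pvDiffs]
  | cons p t ih =>
      have hocc : ∀ w, pvOcc (p :: t) w = if p.2 == w then p.1 :: pvOcc t w else pvOcc t w := by
        intro w
        simp only [pvOcc, List.filter_cons]
        split <;> simp
      constructor
      · intro hx
        simp only [pvDlist, List.mem_append] at hx
        rcases hx with hx | hx
        · -- the new diff p.1 - last(p.2)
          refine ⟨p.2, ?_⟩
          rcases hc : d.contains p.2 with _ | _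
          · simp [hc] at hx
          · simp only [hc, if_true, List.mem_singleton] at hx
            simp [hocc, pvPrior, hc, pvDiffs_cons_cons, hx]
        · rcases (ih _).1 hx with ⟨w, hw⟩
          by_cases hwp : w = p.2
          · -- prior after insert is [p.1]
            rw [hwp] at hw
            refine ⟨p.2, ?_⟩
            simp only [pvPrior, PySem.Dict.contains_insert_self, if_true,
              PySem.Dict.getD_insert_self] at hw
            simp only [hocc, beq_self_eq_true, if_true]
            rcases hc : d.contains p.2 with _ | _
            · simpa [pvPrior, hc] using hw
            · simp [pvPrior, hc, pvDiffs_cons_cons]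
              right; exact hw
          · refine ⟨w, ?_⟩
            have hco : d.contains w = (d.insert p.2 p.1).contains w := by
              simp [PySem.Dict.contains_insert, beq_eq_false_iff_ne.2 hwp]
            have hgd : (d.insert p.2 p.1).getD w 0 = d.getD w 0 :=
              PySem.Dict.getD_insert_of_ne d p.1 0 hwp
            have hne : (p.2 == w) = false := beq_eq_false_iff_ne.2 (Ne.symm hwp)
            rw [hocc, hne, if_neg (by simp)]
            simpa [pvPrior, hco, hgd] using hw
      · rintro ⟨w, hw⟩
        simp only [pvDlist, List.mem_append]
        by_cases hwp : w = p.2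
        · rw [hwp] at hw
          rw [hocc] at hw
          simp only [beq_self_eq_true, if_true] at hw
          rcases hc : d.contains p.2 with _ | _
          · right
            apply (ih _).2
            refine ⟨p.2, ?_⟩
            simpa [pvPrior, hc, PySem.Dict.contains_insert_self,
              PySem.Dict.getD_insert_self] using hw
          · rw [show pvPrior d p.2 = [d.getD p.2 0] by simp [pvPrior, hc]] at hw
            rw [show ([d.getD p.2 0] ++ p.1 :: pvOcc t p.2) = d.getD p.2 0 :: p.1 :: pvOcc t p.2
                by rfl, pvDiffs_cons_cons] at hw
            rcases List.mem_cons.1 hw with hx | hx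
            · left; simp [hx]
            · right
              apply (ih _).2
              refine ⟨p.2, ?_⟩
              simpa [pvPrior, PySem.Dict.contains_insert_self,
                PySem.Dict.getD_insert_self] using hx
        · right
          apply (ih _).2
          refine ⟨w, ?_⟩
          have hco : (d.insert p.2 p.1).contains w = d.contains w := by
            simp [PySem.Dict.contains_insert, beq_eq_false_iff_ne.2 hwp]
          have hgd : (d.insert p.2 p.1).getD w 0 = d.getD w 0 :=
            PySem.Dict.getD_insert_of_ne d p.1 0 hwp
          have hne : (p.2 == w) = false := beq_eq_false_iff_ne.2 (Ne.symm hwp)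
          rw [hocc, hne, if_neg (by simp)] at hw
          simpa [pvPrior, hco, hgd] using hw

theorem pvGroup_getD (l : List (Int × String)) (w : String) :
    (l.foldl pvGroupStep PySem.Dict.empty).getD w [] = pvOcc l w := by
  have h : l.foldl pvGroupStep PySem.Dict.empty
      = (l.map Prod.swap).foldl (fun d q => d.modify q.1 [] (fun v => v ++ [q.2]))
          PySem.Dict.empty := by
    rw [List.foldl_map]
    rfl
  rw [h, PySem.Dict.getD_foldl_modify_append]
  simp only [PySem.Dict.getD_empty, List.nil_append, pvOcc, List.filter_map]
  rw [List.map_map]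
  congr 1

theorem pvGroup_keys_mem (l : List (Int × String)) (w : String) :
    w ∈ (l.foldl pvGroupStep PySem.Dict.empty).keys ↔ w ∈ l.map (·.2) := by
  have h : (l.foldl pvGroupStep PySem.Dict.empty).keys
      = PySem.Set.update (PySem.Dict.empty : PySem.Dict String (List Int)).keys (l.map (·.2)) :=
    PySem.Dict.keys_foldl_modify_key l (fun p => p.2) [] (fun _ p v => v ++ [p.1])
      PySem.Dict.empty
  rw [h, PySem.Set.mem_update]
  simp [PySem.Dict.keys_empty]

theorem pvGroup_keys_nodup (l : List (Int × String)) :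
    (l.foldl pvGroupStep PySem.Dict.empty).keys.Nodup :=
  PySem.Dict.nodup_keys_foldl_modify_key l (fun p => p.2) [] (fun _ p v => v ++ [p.1])
    PySem.Dict.empty PySem.Dict.nodup_keys_empty

theorem pvOcc_ne_nil_of_mem (l : List (Int × String)) (w : String) (x : Int)
    (hx : x ∈ pvDiffs (pvOcc l w)) : w ∈ l.map (·.2) := by
  rcases ho : pvOcc l w with _ | ⟨a, t⟩
  · rw [ho] at hx; simp [pvDiffs] at hx
  · have : a ∈ pvOcc l w := by rw [ho]; exact List.mem_cons_self
    simp only [pvOcc, List.mem_map, List.mem_filter] at this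
    rcases this with ⟨p, ⟨hp, hpw⟩, _⟩
    exact List.mem_map.2 ⟨p, hp, by simpa using hpw⟩

-- membership in B's flattened group-wise diff lists
theorem pvFlatB_mem (arr : List String) (x : Int) :
    (x ∈ (((PySem.List.enumerate arr).foldl pvGroupStep PySem.Dict.empty).values.map pvDiffs).flatten)
      ↔ ∃ w, x ∈ pvDiffs (pvOcc (PySem.List.enumerate arr) w) := by
  set l := PySem.List.enumerate arr with hl
  have hv : (l.foldl pvGroupStep PySem.Dict.empty).values
      = (l.foldl pvGroupStep PySem.Dict.empty).keys.map
          (fun k => (l.foldl pvGroupStep PySem.Dict.empty).getD k []) :=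
    PySem.Dict.values_eq_map_keys _ (pvGroup_keys_nodup l) []
  rw [hv]
  simp only [List.mem_flatten, List.mem_map, List.map_map]
  constructor
  · rintro ⟨ds, ⟨w, hw, rfl⟩, hx⟩
    exact ⟨w, by simpa [Function.comp, pvGroup_getD] using hx⟩
  · rintro ⟨w, hx⟩
    have hwk : w ∈ (l.foldl pvGroupStep PySem.Dict.empty).keys :=
      (pvGroup_keys_mem l w).2 (pvOcc_ne_nil_of_mem l w x hx)
    exact ⟨pvDiffs ((l.foldl pvGroupStep PySem.Dict.empty).getD w []),
      ⟨w, hwk, rfl⟩, by simpa [pvGroup_getD] using hx⟩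

-- ===== VERDICT (by name: the statement is the Claim_ definition above) =====
theorem nearestRepeatedEntries_spec : Claim_equal_nearestRepeatedEntries := by
  intro arr _
  show nearestRepeatedEntries arr = nearestRepeatedEntries_alt arr
  simp only [nearestRepeatedEntries, nearestRepeatedEntries_alt]
  have hmem : ∀ x, x ∈ pvDlist (PySem.List.enumerate arr) PySem.Dict.empty
      ↔ x ∈ ((((PySem.List.enumerate arr).foldl pvGroupStep PySem.Dict.empty).values.map
          pvDiffs).flatten) := by
    intro x
    rw [pvDlist_mem, pvFlatB_mem]
    constructor <;> rintro ⟨w, hw⟩ <;>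
      exact ⟨w, by simpa [pvPrior, PySem.Dict.contains_empty] using hw⟩
  rw [pvFoldA_snd, pvOuter_eq, pvFoldMin_none, pvFoldMin_none, pvMin?_congr _ _ hmem]
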